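-- pv_equiv track=rewrite | github.com/Khaled-Ayman1/Signal-Processing | src/signal_processing.py | add_signals
-- ===== SOURCE A (Python) =====
-- def add_signals(signal_list):
--
--     sorted_indices = sorted(set(index for signal in signal_list for index, value in signal))
--
--     summed_signal = {index: 0 for index in sorted_indices}
--
--     for signal in signal_list:
--         for index, value in signal:
--             summed_signal[index] += value
--
--     result_signal = [(index, summed_signal[index]) for index in sorted_indices]
--     return result_signal
-- ===== SOURCE B (Python) =====
-- def add_signals(signal_list):
--     # No dictionary at all: sort all (index, value) pairs once by index,
--     # then merge runs of equal indices in one linear scan.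
--     pairs = sorted((pair for sig in signal_list for pair in sig),
--                    key=lambda p: p[0])
--     result = []
--     for index, value in pairs:
--         if result and result[-1][0] == index:
--             result[-1] = (index, result[-1][1] + value)
--         else:
--             result.append((index, value))
--     return result
-- ===== Notes on version B (the rewrite author's own statement) =====
-- stated objective: alternative
-- what changed: Drops the dictionary entirely: instead of A's hash-keyed accumulation over a pre-sorted, zero-initialized index set, B sorts the flattened (index, value) pairs once and merges runs of equal indices in a single linear scan.
import Mathlib
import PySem

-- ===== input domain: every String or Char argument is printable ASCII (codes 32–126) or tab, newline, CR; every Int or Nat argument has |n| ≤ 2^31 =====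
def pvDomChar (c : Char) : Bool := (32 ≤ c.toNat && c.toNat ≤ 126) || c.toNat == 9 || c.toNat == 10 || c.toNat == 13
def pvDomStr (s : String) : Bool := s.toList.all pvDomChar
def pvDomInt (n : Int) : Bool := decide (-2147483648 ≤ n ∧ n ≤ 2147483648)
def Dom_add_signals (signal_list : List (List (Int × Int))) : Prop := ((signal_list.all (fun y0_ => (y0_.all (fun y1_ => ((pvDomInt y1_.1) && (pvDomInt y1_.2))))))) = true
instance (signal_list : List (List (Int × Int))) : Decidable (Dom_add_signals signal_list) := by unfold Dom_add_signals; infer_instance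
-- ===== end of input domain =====

-- B drops A's dictionary: it sorts the flattened (index, value) pairs once and merges
-- runs of equal indices in one linear scan — objective: alternative algorithm, same cost.


-- ===== PORT A =====
-- `summed_signal[index] += value` is ported as `modify index 0 (· + value)`: exact here,
-- because every occurring index was pre-inserted by the zero-initializing comprehension.
def add_signals (signal_list : List (List (Int × Int))) : List (Int × Int) :=
  let sorted_indices : List Int :=
    PySem.List.sorted
      (PySem.Set.ofList (signal_list.flatMap (fun signal => signal.map (fun p => p.1))))
      (fun x => x)
  let summed_signal0 : PySem.Dict Int Int :=
    sorted_indices.foldl (fun d index => d.insert index 0) PySem.Dict.empty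
  let summed_signal : PySem.Dict Int Int :=
    signal_list.foldl (fun d signal =>
      signal.foldl (fun d p => d.modify p.1 0 (fun x => x + p.2)) d) summed_signal0
  sorted_indices.map (fun index => (index, summed_signal.getD index 0))

-- ===== PORT B =====
-- B's loop body; the loop keeps `result` reversed, so Python's `result[-1]` is the head
def pvStep (racc : List (Int × Int)) (p : Int × Int) : List (Int × Int) :=
  match racc with
  | (j, w) :: t => if j == p.1 then (p.1, w + p.2) :: t else (p.1, p.2) :: (j, w) :: t
  | [] => [(p.1, p.2)]

def add_signals_alt (signal_list : List (List (Int × Int))) : List (Int × Int) :=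
  let pairs : List (Int × Int) :=
    PySem.List.sorted (signal_list.flatten) (fun p => p.1)
  (pairs.foldl pvStep []).reverse

-- ===== PRECONDITION & SPEC =====
def Spec_add_signals (signal_list : List (List (Int × Int))) (out : List (Int × Int)) : Prop := out = add_signals_alt signal_list
instance (signal_list : List (List (Int × Int))) (out : List (Int × Int)) : Decidable (Spec_add_signals signal_list out) := by unfold Spec_add_signals; infer_instance

-- ===== CLAIM (what is proved, stated in full; the proofs are below) =====
def Claim_equal_add_signals : Prop := ∀ (signal_list : List (List (Int × Int))), Dom_add_signals signal_list → Spec_add_signals signal_list (add_signals signal_list)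

-- ===== LEMMAS AND PROOFS =====

-- total contribution of index k in a flat pair list
def pvSum (pairs : List (Int × Int)) (k : Int) : Int :=
  ((pairs.filter (fun p => decide (p.1 = k))).map (fun p => p.2)).sum

theorem pvSum_nil (k : Int) : pvSum [] k = 0 := rfl

theorem pvSum_cons (p : Int × Int) (pairs : List (Int × Int)) (k : Int) :
    pvSum (p :: pairs) k = (if p.1 = k then p.2 else 0) + pvSum pairs k := by
  by_cases h : p.1 = k <;> simp [pvSum, h]

theorem pvSum_eq_zero (pairs : List (Int × Int)) (k : Int)
    (h : ∀ p ∈ pairs, p.1 ≠ k) : pvSum pairs k = 0 := by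
  induction pairs with
  | nil => rfl
  | cons p rest ih =>
    rw [pvSum_cons, if_neg (h p (List.mem_cons_self)), ih (fun q hq => h q (List.mem_cons_of_mem _ hq))]
    simp

theorem pvSum_perm (xs ys : List (Int × Int)) (h : xs.Perm ys) (k : Int) :
    pvSum xs k = pvSum ys k :=
  List.Perm.sum_eq (List.Perm.map _ (List.Perm.filter _ h))

-- A's accumulation: getD after the modify-fold
theorem getD_foldl_modify_add (pairs : List (Int × Int)) (d : PySem.Dict Int Int) (k : Int) :
    (pairs.foldl (fun d p => d.modify p.1 0 (fun x => x + p.2)) d).getD k 0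
      = d.getD k 0 + pvSum pairs k := by
  induction pairs generalizing d with
  | nil => simp [pvSum_nil]
  | cons p rest ih =>
    simp only [List.foldl_cons, ih, pvSum_cons]
    rw [PySem.Dict.getD_modify]
    by_cases h : k = p.1
    · simp [h]; ring
    · have h' : ¬ p.1 = k := fun hh => h hh.symm
      simp [h, h']

-- A's zero-initialized dict yields 0 everywhere (under default 0)
theorem getD_foldl_insert_zero (ks : List Int) (d : PySem.Dict Int Int) (k : Int)
    (h : d.getD k 0 = 0) :
    (ks.foldl (fun d i => d.insert i 0) d).getD k 0 = 0 := by
  induction ks generalizing d with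
  | nil => simpa using h
  | cons i rest ih =>
    simp only [List.foldl_cons]
    apply ih
    rw [PySem.Dict.getD_insert]
    split_ifs <;> simp [h]

-- recursive description of B's merge loop, with the pending (index, running total) carried
def pvGrpFrom (j w : Int) : List (Int × Int) → List (Int × Int)
  | [] => [(j, w)]
  | p :: rest =>
    if p.1 = j then pvGrpFrom j (w + p.2) rest else (j, w) :: pvGrpFrom p.1 p.2 rest

theorem foldl_pvStep_eq_grpFrom (xs : List (Int × Int)) :
    ∀ (j w : Int) (t : List (Int × Int)),
    xs.foldl pvStep ((j, w) :: t) = (pvGrpFrom j w xs).reverse ++ t := by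
  induction xs with
  | nil => intro j w t; simp [pvGrpFrom]
  | cons p rest ih =>
    intro j w t
    rw [List.foldl_cons]
    by_cases h : p.1 = j
    · have e : pvStep ((j, w) :: t) p = (j, w + p.2) :: t := by simp [pvStep, h]
      rw [e, ih]
      simp [pvGrpFrom, h]
    · have hb : (j == p.1) = false := beq_eq_false_iff_ne.mpr (fun hh => h hh.symm)
      have e : pvStep ((j, w) :: t) p = (p.1, p.2) :: (j, w) :: t := by simp [pvStep, hb]
      rw [e, ih]
      simp [pvGrpFrom, h]

theorem mem_fst_grpFrom (xs : List (Int × Int)) :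
    ∀ (j w k : Int), k ∈ (pvGrpFrom j w xs).map Prod.fst ↔ (k = j ∨ k ∈ xs.map Prod.fst) := by
  induction xs with
  | nil => intro j w k; simp [pvGrpFrom]
  | cons p rest ih =>
    intro j w k
    simp only [pvGrpFrom]
    by_cases h : p.1 = j
    · rw [if_pos h, ih]
      simp [h]
    · rw [if_neg h]
      simp only [List.map_cons, List.mem_cons, ih]

theorem grpFrom_pairwise_lt (xs : List (Int × Int))
    (hs : xs.Pairwise (fun a b => a.1 ≤ b.1)) :
    ∀ (j w : Int), (∀ p ∈ xs, j ≤ p.1) →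
    (pvGrpFrom j w xs).Pairwise (fun a b => a.1 < b.1) := by
  induction xs with
  | nil => intro j w _; simp [pvGrpFrom]
  | cons p rest ih =>
    rw [List.pairwise_cons] at hs
    obtain ⟨hp, hrest⟩ := hs
    intro j w hj
    simp only [pvGrpFrom]
    by_cases h : p.1 = j
    · rw [if_pos h]
      exact ih hrest j (w + p.2) (fun q hq => h ▸ hp q hq)
    · rw [if_neg h]
      have hjp : j < p.1 := lt_of_le_of_ne (hj p List.mem_cons_self) (fun hh => h hh.symm)
      refine List.Pairwise.cons ?_ (ih hrest p.1 p.2 hp)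
      intro q hq
      have : q.1 ∈ (pvGrpFrom p.1 p.2 rest).map Prod.fst := List.mem_map_of_mem hq
      rcases (mem_fst_grpFrom rest p.1 p.2 q.1).mp this with h1 | h1
      · omega
      · obtain ⟨r, hr, hr1⟩ := List.mem_map.mp h1
        have := hp r hr
        omega

theorem grpFrom_values (xs : List (Int × Int))
    (hs : xs.Pairwise (fun a b => a.1 ≤ b.1)) :
    ∀ (j w : Int), (∀ p ∈ xs, j ≤ p.1) →
    ∀ q ∈ pvGrpFrom j w xs, q.2 = (if q.1 = j then w else 0) + pvSum xs q.1 := by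
  induction xs with
  | nil =>
    intro j w _ q hq
    simp only [pvGrpFrom, List.mem_singleton] at hq
    subst hq
    simp [pvSum_nil]
  | cons p rest ih =>
    rw [List.pairwise_cons] at hs
    obtain ⟨hp, hrest⟩ := hs
    intro j w hj q hq
    simp only [pvGrpFrom] at hq
    by_cases h : p.1 = j
    · rw [if_pos h] at hq
      have hv := ih hrest j (w + p.2) (fun r hr => h ▸ hp r hr) q hq
      rw [hv, pvSum_cons, h]
      by_cases hqj : q.1 = j
      · rw [if_pos hqj, if_pos hqj, if_pos hqj.symm]; ring
      · rw [if_neg hqj, if_neg hqj, if_neg (fun hh => hqj hh.symm)]; ring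
    · rw [if_neg h] at hq
      have hjp : j < p.1 := lt_of_le_of_ne (hj p List.mem_cons_self) (fun hh => h hh.symm)
      rcases List.mem_cons.mp hq with rfl | hq'
      · have hz : pvSum (p :: rest) j = 0 := by
          apply pvSum_eq_zero
          intro r hr
          rcases List.mem_cons.mp hr with rfl | hr'
          · omega
          · have := hp r hr'; omega
        simp [hz]
      · have hqj : q.1 ≠ j := by
          have : q.1 ∈ (pvGrpFrom p.1 p.2 rest).map Prod.fst := List.mem_map_of_mem hq'
          rcases (mem_fst_grpFrom rest p.1 p.2 q.1).mp this with h1 | h1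
          · omega
          · obtain ⟨r, hr, hr1⟩ := List.mem_map.mp h1
            have := hp r hr
            omega
        have hv := ih hrest p.1 p.2 hp q hq'
        rw [hv, pvSum_cons, if_neg hqj]
        by_cases hqp : q.1 = p.1
        · rw [if_pos hqp, if_pos hqp.symm]; ring
        · rw [if_neg hqp, if_neg (fun hh => hqp hh.symm)]; ring

-- ===== VERDICT (by name: the statement is the Claim_ definition above) =====
theorem add_signals_spec : Claim_equal_add_signals := by
  intro signal_list _
  unfold Spec_add_signals
  simp only [add_signals, add_signals_alt]
  set pairs : List (Int × Int) := signal_list.flatten with hpairs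
  have hflat : signal_list.flatMap (fun signal => signal.map (fun p => p.1))
      = pairs.map (fun p => p.1) := by
    rw [hpairs, List.flatMap_def, ← List.map_flatten]
  set K : List Int := PySem.Set.ofList (pairs.map (fun p => p.1)) with hK
  -- A's output is the sorted key list, each paired with the total of that key
  have hA : (PySem.List.sorted K (fun x => x)).map
      (fun index => (index, ((signal_list.foldl (fun d signal =>
          signal.foldl (fun d p => d.modify p.1 0 (fun x => x + p.2)) d)
        ((PySem.List.sorted K (fun x => x)).foldl
          (fun d index => d.insert index 0) PySem.Dict.empty)).getD index 0)))
      = (PySem.List.sorted K (fun x => x)).map (fun k => (k, pvSum pairs k)) := by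
    apply List.map_congr_left
    intro k _
    rw [← List.foldl_flatten, getD_foldl_modify_add]
    rw [getD_foldl_insert_zero _ _ _ (by simp [PySem.Dict.getD_empty])]
    rw [← hpairs]
    simp
  rw [hflat, ← hK, hA]
  -- B's side
  set sp : List (Int × Int) := PySem.List.sorted pairs (fun p => p.1) with hsp
  have hperm : sp.Perm pairs := PySem.List.sorted_perm pairs (fun p => p.1) false
  have hsorted : sp.Pairwise (fun a b => a.1 ≤ b.1) :=
    PySem.List.sorted_pairwise pairs (fun p => p.1)
  cases hspc : sp with
  | nil =>
    rw [hspc] at hperm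
    have hnil : pairs = [] := hperm.symm.eq_nil
    have hKnil : K = [] := by rw [hK, hnil]; rfl
    rw [hKnil]
    rfl
  | cons q rest =>
    rw [hspc] at hsorted hperm
    rw [List.pairwise_cons] at hsorted
    obtain ⟨hq, hrest⟩ := hsorted
    rw [List.foldl_cons]
    have e0 : pvStep [] q = (q.1, q.2) :: [] := rfl
    rw [e0, foldl_pvStep_eq_grpFrom rest q.1 q.2 []]
    rw [List.append_nil, List.reverse_reverse]
    set bs : List (Int × Int) := pvGrpFrom q.1 q.2 rest with hbs
    -- bs's keys are strictly increasing
    have hlt : bs.Pairwise (fun a b => a.1 < b.1) :=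
      grpFrom_pairwise_lt rest hrest q.1 q.2 hq
    have hkeyslt : (bs.map Prod.fst).Pairwise (· < ·) := by
      rw [List.pairwise_map]; exact hlt
    -- bs's keys have exactly the members of K
    have hmemK : ∀ k : Int, k ∈ bs.map Prod.fst ↔ k ∈ K := by
      intro k
      rw [hbs, mem_fst_grpFrom rest q.1 q.2 k, hK, PySem.Set.mem_ofList]
      have hm : k ∈ (q :: rest).map Prod.fst ↔ k ∈ pairs.map Prod.fst :=
        (List.Perm.map Prod.fst hperm).mem_iff
      simp only [List.map_cons, List.mem_cons] at hm
      rw [← hm]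
    -- hence sorted K id = bs.map fst
    have hKeq : PySem.List.sorted K (fun x => x) = bs.map Prod.fst := by
      apply PySem.List.sorted_eq_of_perm_of_pairwise_lt
      · have h1 : (bs.map Prod.fst).Nodup := hkeyslt.imp (fun h => ne_of_lt h)
        have h2 : K.Nodup := by rw [hK]; exact PySem.Set.nodup_ofList _
        exact (List.perm_ext_iff_of_nodup h1 h2).mpr hmemK
      · exact hkeyslt
    -- each pair of bs carries the total of its key
    have hvals : ∀ p ∈ bs, p = (p.1, pvSum pairs p.1) := by
      intro p hp
      have hv := grpFrom_values rest hrest q.1 q.2 hq p hp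
      have hpsum : p.2 = pvSum pairs p.1 := by
        rw [hv, ← pvSum_perm _ _ hperm p.1, pvSum_cons]
        by_cases hc : p.1 = q.1
        · rw [if_pos hc, if_pos hc.symm]
        · rw [if_neg hc, if_neg (fun hh => hc hh.symm)]
      calc p = (p.1, p.2) := rfl
        _ = (p.1, pvSum pairs p.1) := by rw [hpsum]
    rw [hKeq, List.map_map]
    conv_rhs => rw [← List.map_id bs]
    apply List.map_congr_left
    intro p hp
    exact ((hvals p hp).symm : _)
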